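-- pv_equiv track=rewrite | github.com/rjorton/SeqFeats | seqfeats_host_cpb.py | count_codons
-- ===== SOURCE A (Python) =====
-- def count_codons(this_seq, codon_dict):
--     for i in range(0, len(this_seq)-1, 3):
--         this_codon = this_seq[i:i+3]
--
--         if this_codon in codon_dict:
--             codon_dict[this_codon] += 1
--         else:
--             codon_dict["NNN"] += 1
--
--     return codon_dict
-- ===== SOURCE B (Python) =====
-- def count_codons(this_seq, codon_dict):
--     # Per-key closed form: instead of incrementing the dict once per codon, compute
--     # each key's final value directly as old value + (occurrences of that key among
--     # the codons) + (for "NNN", the number of codons matching no key at all).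
--     codons = [this_seq[i:i + 3] for i in range(0, len(this_seq) - 1, 3)]
--     unmatched = sum(1 for c in codons if c not in codon_dict)
--     for key in codon_dict:
--         codon_dict[key] += codons.count(key) + (unmatched if key == "NNN" else 0)
--     return codon_dict
-- ===== Notes on version B (the rewrite author's own statement) =====
-- stated objective: alternative
-- what changed: B replaces A's per-codon increment loop over the sequence by a per-key closed form: it slices the codon list once, counts unmatched codons, then computes every dict key's final value in one pass over the keys (old value + occurrences of that key + unmatched codons for 'NNN').
import Mathlib
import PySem

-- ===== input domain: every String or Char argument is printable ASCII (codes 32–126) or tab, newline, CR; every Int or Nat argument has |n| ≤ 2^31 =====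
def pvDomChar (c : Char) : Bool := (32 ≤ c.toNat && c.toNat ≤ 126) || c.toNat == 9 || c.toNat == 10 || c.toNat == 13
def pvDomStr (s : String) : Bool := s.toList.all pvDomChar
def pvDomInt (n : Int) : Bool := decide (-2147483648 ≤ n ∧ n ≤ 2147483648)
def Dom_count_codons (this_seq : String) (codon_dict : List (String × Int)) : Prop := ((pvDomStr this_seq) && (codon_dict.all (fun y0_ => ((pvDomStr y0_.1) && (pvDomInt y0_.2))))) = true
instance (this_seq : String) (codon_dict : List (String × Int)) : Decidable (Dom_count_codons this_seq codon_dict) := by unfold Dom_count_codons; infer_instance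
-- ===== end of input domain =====

-- B replaces A's per-codon increment loop by a per-key closed form (each key's final value
-- computed directly from codon occurrence counts); like A, B mutates codon_dict in place
-- (within Pre_ the final mutated state equals A's), equality proved on the return value.

-- ===== PORT A =====
-- `k in codon_dict` (dict key membership, first-match association-list reading)
def pvHasKey (d : List (String × Int)) (k : String) : Bool := d.any (fun p => p.1 == k)

-- `codon_dict[k] += 1`: bump the first entry with key k (no entry: Python raises KeyError,
-- excluded by Pre_; here the list is returned unchanged)
def pvIncr : List (String × Int) → String → List (String × Int)
  | [], _ => []
  | (a, v) :: rest, k => if a == k then (a, v + 1) :: rest else (a, v) :: pvIncr rest k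

def count_codons (this_seq : String) (codon_dict : List (String × Int)) : List (String × Int) :=
  (PySem.List.pyRange 0 (PySem.Str.len this_seq - 1) 3).foldl
    (fun d i =>
      let this_codon := PySem.Str.slice this_seq (some i) (some (i + 3))
      if pvHasKey d this_codon then pvIncr d this_codon else pvIncr d "NNN")
    codon_dict

-- ===== PORT B =====
def count_codons_alt (this_seq : String) (codon_dict : List (String × Int)) : List (String × Int) :=
  let codons := (PySem.List.pyRange 0 (PySem.Str.len this_seq - 1) 3).map
      (fun i => PySem.Str.slice this_seq (some i) (some (i + 3)))
  let unmatched : Int :=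
    ((codons.filter (fun c => !codon_dict.any (fun p => p.1 == c))).length : Int)
  codon_dict.map (fun p =>
    (p.1, p.2 + (codons.count p.1 : Int) + (if p.1 == "NNN" then unmatched else 0)))

-- ===== PRECONDITION & SPEC =====
-- Pre_ excludes (a) exactly the inputs on which Python A raises KeyError — a sliced codon
-- that is neither a key of codon_dict nor covered by a "NNN" key — and (b) association
-- lists with duplicate keys, which represent no Python dict at all (dict keys are distinct).
def Pre_count_codons (this_seq : String) (codon_dict : List (String × Int)) : Prop :=
  (codon_dict.map Prod.fst).Nodup ∧
  ∀ i ∈ PySem.List.pyRange 0 (PySem.Str.len this_seq - 1) 3,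
    PySem.Str.slice this_seq (some i) (some (i + 3)) ∈ codon_dict.map Prod.fst
    ∨ "NNN" ∈ codon_dict.map Prod.fst
instance (this_seq : String) (codon_dict : List (String × Int)) : Decidable (Pre_count_codons this_seq codon_dict) := by unfold Pre_count_codons; infer_instance
def pvWitness_count_codons : String × (List (String × Int)) := ("ATGAAC", [("ATG", 1), ("NNN", 0)])
def Spec_count_codons (this_seq : String) (codon_dict : List (String × Int)) (out : List (String × Int)) : Prop := out = count_codons_alt this_seq codon_dict
instance (this_seq : String) (codon_dict : List (String × Int)) (out : List (String × Int)) : Decidable (Spec_count_codons this_seq codon_dict out) := by unfold Spec_count_codons; infer_instance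

-- ===== CLAIM (what is proved, stated in full; the proofs are below) =====
def Claim_equal_count_codons : Prop := ∀ (this_seq : String) (codon_dict : List (String × Int)), Dom_count_codons this_seq codon_dict → Pre_count_codons this_seq codon_dict → Spec_count_codons this_seq codon_dict (count_codons this_seq codon_dict)

-- ===== LEMMAS AND PROOFS =====

-- the effective key a codon is merged under, relative to a fixed key list K
def pvEKey (K : List String) (c : String) : String := if K.any (· == c) then c else "NNN"

-- `codon_dict[k] += n` generalisation of pvIncr (identity when k is absent)
def pvAddBy : List (String × Int) → String → Int → List (String × Int)
  | [], _, _ => []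
  | (a, v) :: rest, k, n => if a == k then (a, v + n) :: rest else (a, v) :: pvAddBy rest k n

lemma pvAddBy_keys (d : List (String × Int)) (k : String) (n : Int) :
    (pvAddBy d k n).map Prod.fst = d.map Prod.fst := by
  induction d with
  | nil => rfl
  | cons p rest ih =>
    obtain ⟨a, v⟩ := p
    by_cases h : a == k <;> simp [pvAddBy, h, ih]

lemma pvIncr_eq (d : List (String × Int)) (k : String) : pvIncr d k = pvAddBy d k 1 := by
  induction d with
  | nil => rfl
  | cons p rest ih =>
    obtain ⟨a, v⟩ := p
    by_cases h : a == k <;> simp [pvIncr, pvAddBy, h, ih]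

lemma pvHasKey_eq (d : List (String × Int)) (c : String) :
    pvHasKey d c = (d.map Prod.fst).any (· == c) := by
  rw [List.any_map]; rfl

-- A's loop body, rewritten as one pvAddBy under the effective key (keys never change)
lemma pvL_A (K : List String) (l : List String) :
    ∀ (d : List (String × Int)), d.map Prod.fst = K →
      l.foldl (fun d c => if pvHasKey d c then pvIncr d c else pvIncr d "NNN") d
        = l.foldl (fun d c => pvAddBy d (pvEKey K c) 1) d := by
  induction l with
  | nil => intro d _; rfl
  | cons c rest ih =>
    intro d hK
    rw [List.foldl_cons, List.foldl_cons]
    have hhk : pvHasKey d c = K.any (· == c) := by rw [pvHasKey_eq, hK]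
    by_cases h : K.any (· == c) = true
    · have he : pvEKey K c = c := by simp [pvEKey, h]
      rw [if_pos (by rw [hhk]; exact h), pvIncr_eq, he]
      exact ih _ (by rw [pvAddBy_keys, hK])
    · have he : pvEKey K c = "NNN" := by simp only [pvEKey, if_neg h]
      rw [if_neg (by rw [hhk]; exact h), pvIncr_eq, he]
      exact ih _ (by rw [pvAddBy_keys, hK])

-- with distinct keys, one pvAddBy-by-1 commutes past a value-adjusting map
lemma pvAddBy_one_map (e : String) (g : String → Int) :
    ∀ (d : List (String × Int)), (d.map Prod.fst).Nodup →
      (pvAddBy d e 1).map (fun p => (p.1, p.2 + g p.1))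
        = d.map (fun p => (p.1, p.2 + ((if p.1 == e then 1 else 0) + g p.1)))
  | [], _ => rfl
  | (a, v) :: rest, hnd => by
    simp only [List.map_cons, List.nodup_cons] at hnd
    by_cases h : a == e
    · have ha : a = e := by simpa using h
      have hrest : rest.map (fun p => ((p.1 : String), p.2 + ((if p.1 == e then 1 else 0) + g p.1)))
          = rest.map (fun p => ((p.1 : String), p.2 + g p.1)) := by
        apply List.map_congr_left
        intro q hq
        have hq1 : q.1 ≠ e := by
          intro hqe
          apply hnd.1
          rw [ha, ← hqe]
          exact List.mem_map_of_mem hq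
        simp [hq1]
      simp only [pvAddBy, h, if_true, List.map_cons, hrest]
      congr 1
      simp only [Prod.mk.injEq, true_and]
      ring
    · simp only [pvAddBy, h, if_false, Bool.false_eq_true, List.map_cons,
        pvAddBy_one_map e g rest hnd.2]
      congr 1
      simp

-- A's fold in closed form: each entry gains the count of its key among the effective keys
lemma pvFoldA (K : List String) (hK : K.Nodup) (cs : List String) :
    ∀ (d : List (String × Int)), d.map Prod.fst = K →
      cs.foldl (fun d c => pvAddBy d (pvEKey K c) 1) d
        = d.map (fun p => (p.1, p.2 + ((cs.map (pvEKey K)).count p.1 : Int))) := by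
  induction cs with
  | nil =>
    intro d _
    simp [List.count_nil]
  | cons c rest ih =>
    intro d hKd
    rw [List.foldl_cons, ih _ (by rw [pvAddBy_keys, hKd]),
        pvAddBy_one_map (pvEKey K c)
          (fun k => (((rest.map (pvEKey K)).count k : Nat) : Int)) d (hKd ▸ hK)]
    apply List.map_congr_left
    intro p _
    simp only [List.map_cons, List.count_cons, Prod.mk.injEq, true_and]
    by_cases hpe : p.1 = pvEKey K c
    · simp only [hpe, beq_self_eq_true, if_true]
      push_cast
      ring
    · have h1 : (p.1 == pvEKey K c) = false := by simpa using hpe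
      have h2 : (pvEKey K c == p.1) = false := by simpa using Ne.symm hpe
      simp [h1, h2]

-- counting effective keys = counting raw codons, plus the unmatched ones for "NNN"
lemma pvCountEKey (K : List String) (cs : List String) (k : String) (hk : k ∈ K) :
    ((cs.map (pvEKey K)).count k : Int)
      = (cs.count k : Int)
        + (if k == "NNN" then ((cs.filter (fun c => !K.any (· == c))).length : Int) else 0) := by
  induction cs with
  | nil => simp
  | cons c rest ih =>
    simp only [List.map_cons, List.count_cons, List.filter_cons]
    by_cases h : K.any (· == c)
    · have he : pvEKey K c = c := by simp [pvEKey, h]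
      rw [he, show (!K.any (· == c)) = false by simp [h]]
      by_cases hck : c = k <;> by_cases hn : k = "NNN" <;>
        simp [hck, hn] at ih ⊢ <;> omega
    · have he : pvEKey K c = "NNN" := by simp only [pvEKey, if_neg h]
      have hck : c ≠ k := by
        intro hkc; subst hkc
        exact h (List.any_eq_true.mpr ⟨c, hk, by simp⟩)
      rw [he, show (!K.any (· == c)) = true by simp [h], if_pos rfl]
      by_cases hn : k = "NNN"
      · subst hn
        simp [hck] at ih ⊢
        omega
      · simp [hck, hn, Ne.symm hn] at ih ⊢
        omega

-- A, with the codon list factored out of the range fold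
lemma pvA_eq (s : String) (d : List (String × Int)) :
    count_codons s d
      = ((PySem.List.pyRange 0 (PySem.Str.len s - 1) 3).map
          (fun i => PySem.Str.slice s (some i) (some (i + 3)))).foldl
          (fun d c => if pvHasKey d c then pvIncr d c else pvIncr d "NNN") d := by
  rw [count_codons, List.foldl_map]

-- ===== VERDICT (by name: the statement is the Claim_ definition above) =====
theorem count_codons_spec : Claim_equal_count_codons := by
  intro s d _ hpre
  unfold Spec_count_codons
  rw [pvA_eq, count_codons_alt]
  rw [pvL_A (d.map Prod.fst) _ d rfl, pvFoldA (d.map Prod.fst) hpre.1 _ d rfl]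
  apply List.map_congr_left
  intro p hp
  have hk : p.1 ∈ d.map Prod.fst := List.mem_map_of_mem hp
  rw [pvCountEKey (d.map Prod.fst) _ p.1 hk]
  have : (fun c => !d.any (fun q => q.1 == c))
      = (fun c => !(d.map Prod.fst).any (· == c)) := by
    funext c; rw [List.any_map]; rfl
  rw [this]
  ring_nf
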